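-- pv_equiv track=rewrite | github.com/open-formulieren/open-forms | bin/change_disable_next_logic_action.py | resolve_key
-- ===== SOURCE A (Python) =====
-- from collections.abc import Collection
--
-- def resolve_key(input_key: str, all_form_variable_keys: Collection[str]) -> str | None:
--     """Resolve a JSON logic variable key to its corresponding form variable key."""
--     # There is a variable with this exact key, it is a valid reference
--     if input_key in all_form_variable_keys:
--         return input_key
--
--     # Process nested paths (editgrid, selectboxes, partners, children). Note that this
--     # doesn't include other nested fields anymore, e.g. a textfield component with key
--     # "foo.bar" will have already been resolved. We process all slices, as these keys
--     # could also include dots.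
--     parts = input_key.split(".")
--     for i in range(1, len(parts)):
--         if (key := ".".join(parts[:i])) in all_form_variable_keys:
--             return key
--
--     # If the outer key also doesn't exist, we cannot resolve the complete key, so we
--     # just return `None`. Note that the digest email should notify the user of invalid
--     # logic rules
--     return None
-- ===== SOURCE B (Python) =====
-- def resolve_key(input_key, all_form_variable_keys):
--     """Resolve a JSON logic variable key to its corresponding form variable key."""
--     best = None
--     for k in all_form_variable_keys:
--         if k == input_key:
--             # an exact match always wins
--             return input_key
--         if input_key.startswith(k + ".") and (best is None or len(k) < len(best)):
--             best = k
--     return best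
-- ===== Notes on version B (the rewrite author's own statement) =====
-- stated objective: alternative
-- what changed: Instead of enumerating successive dotted prefixes of input_key and probing the collection for each, B makes a single pass over all_form_variable_keys, returning immediately on an exact match and otherwise tracking the shortest key k with input_key.startswith(k + '.').
import Mathlib
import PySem

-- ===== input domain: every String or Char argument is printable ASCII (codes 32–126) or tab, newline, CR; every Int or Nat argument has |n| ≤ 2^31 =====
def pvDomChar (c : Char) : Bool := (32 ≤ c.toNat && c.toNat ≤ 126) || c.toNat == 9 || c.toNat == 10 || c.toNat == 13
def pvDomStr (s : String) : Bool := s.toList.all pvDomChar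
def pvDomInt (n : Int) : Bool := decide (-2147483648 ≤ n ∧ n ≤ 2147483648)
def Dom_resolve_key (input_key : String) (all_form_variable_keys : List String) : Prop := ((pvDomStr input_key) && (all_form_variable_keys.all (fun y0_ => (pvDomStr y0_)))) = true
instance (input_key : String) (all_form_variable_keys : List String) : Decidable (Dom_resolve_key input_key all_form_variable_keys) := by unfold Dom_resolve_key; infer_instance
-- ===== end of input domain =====

-- B replaces A's enumerate-prefixes-and-probe loop by a single scan over the key
-- collection that tracks the shortest proper dotted prefix (alternative decomposition,
-- same result; exact match still wins).


-- ===== PORT A =====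
def resolveKeyLoop (keys : List String) (parts : List (List Char)) : List Int → Option String
  | [] => none
  | i :: rest =>
    let key := String.ofList (PySem.Chars.join ['.'] (PySem.List.slice parts none (some i)))
    if keys.contains key then some key else resolveKeyLoop keys parts rest

def resolve_key (input_key : String) (all_form_variable_keys : List String) : Option String :=
  if all_form_variable_keys.contains input_key then some input_key
  else
    let parts := PySem.Chars.splitOn input_key.toList ['.']
    resolveKeyLoop all_form_variable_keys parts (PySem.List.pyRange 1 (parts.length : Int) 1)

-- ===== PORT B =====
def resolveKeyBest (input_key : String) (best : Option String) : List String → Option String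
  | [] => best
  | k :: rest =>
    if k == input_key then some input_key
    else if PySem.Chars.startswith input_key.toList (k.toList ++ ['.']) &&
            (match best with
             | none => true
             | some b => decide (PySem.Chars.len k.toList < PySem.Chars.len b.toList))
    then resolveKeyBest input_key (some k) rest
    else resolveKeyBest input_key best rest

def resolve_key_alt (input_key : String) (all_form_variable_keys : List String) : Option String :=
  resolveKeyBest input_key none all_form_variable_keys

-- ===== PRECONDITION & SPEC =====
def Spec_resolve_key (input_key : String) (all_form_variable_keys : List String) (out : Option String) : Prop := out = resolve_key_alt input_key all_form_variable_keys
instance (input_key : String) (all_form_variable_keys : List String) (out : Option String) : Decidable (Spec_resolve_key input_key all_form_variable_keys out) := by unfold Spec_resolve_key; infer_instance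

-- ===== CLAIM (what is proved, stated in full; the proofs are below) =====
def Claim_equal_resolve_key : Prop := ∀ (input_key : String) (all_form_variable_keys : List String), Dom_resolve_key input_key all_form_variable_keys → Spec_resolve_key input_key all_form_variable_keys (resolve_key input_key all_form_variable_keys)

-- ===== LEMMAS AND PROOFS =====
def splitDot (pre : List Char) : List Char → List (List Char)
  | [] => [pre]
  | c :: rest => if c = '.' then pre :: splitDot [] rest else splitDot (pre ++ [c]) rest

theorem go_eq (fuel : Nat) (l cur : List Char) (acc : List (List Char)) (h : l.length ≤ fuel) :
    PySem.Chars.splitOn.go ['.'] fuel l cur acc = acc.reverse ++ splitDot cur.reverse l := by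
  induction fuel generalizing l cur acc with
  | zero =>
    have hl : l = [] := by simpa using List.length_eq_zero_iff.mp (by omega)
    subst hl
    rw [PySem.Chars.splitOn.go]; simp [splitDot]
  | succ n ih =>
    match l with
    | [] =>
      rw [PySem.Chars.splitOn.go]
      · simp [splitDot]
      · omega
    | c :: rest =>
      have hlen : rest.length ≤ n := by simp at h; omega
      rw [PySem.Chars.splitOn.go]
      have hpre : List.isPrefixOf ['.'] (c :: rest) = ('.' == c) := by
        simp [List.isPrefixOf]
      rw [hpre]
      by_cases hc : c = '.'
      · subst hc
        rw [if_pos (by simp)]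
        have hd : List.drop (['.'] : List Char).length ('.' :: rest) = rest := by simp
        rw [hd, ih rest [] (cur.reverse :: acc) hlen]
        simp [splitDot]
      · rw [if_neg (by rw [beq_iff_eq]; exact fun e => hc e.symm), ih rest (c :: cur) acc hlen]
        simp [splitDot, hc]

theorem splitOn_eq (l : List Char) : PySem.Chars.splitOn l ['.'] = splitDot [] l := by
  rw [PySem.Chars.splitOn, go_eq _ _ _ _ (by omega)]; simp

theorem splitDot_ne_nil (pre l) : splitDot pre l ≠ [] := by
  induction l generalizing pre with
  | nil => simp [splitDot]
  | cons c rest ih => by_cases hc : c = '.' <;> simp [splitDot, hc, ih]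

theorem joinDot_cons (p : List Char) (ps : List (List Char)) (h : ps ≠ []) :
    PySem.Chars.join ['.'] (p :: ps) = p ++ '.' :: PySem.Chars.join ['.'] ps := by
  match ps with
  | q :: rest => rw [PySem.Chars.join_cons_cons]; simp

theorem joinDot_splitDot (pre l) :
    PySem.Chars.join ['.'] (splitDot pre l) = pre ++ l := by
  induction l generalizing pre with
  | nil => simp [splitDot, PySem.Chars.join_singleton]
  | cons c rest ih =>
    by_cases hc : c = '.'
    · subst hc
      rw [splitDot, if_pos rfl, joinDot_cons _ _ (splitDot_ne_nil _ _), ih]; simp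
    · rw [splitDot, if_neg hc, ih]; simp

theorem splitDot_append (pre u v) :
    splitDot pre (u ++ '.' :: v) = splitDot pre u ++ splitDot [] v := by
  induction u generalizing pre with
  | nil => simp [splitDot]
  | cons c rest ih =>
    by_cases hc : c = '.' <;> simp [splitDot, hc, ih]

theorem joinDot_append (xs ys : List (List Char)) (hx : xs ≠ []) (hy : ys ≠ []) :
    PySem.Chars.join ['.'] (xs ++ ys) = PySem.Chars.join ['.'] xs ++ '.' :: PySem.Chars.join ['.'] ys := by
  induction xs with
  | nil => simp at hx
  | cons p rest ih =>
    match rest with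
    | [] => simp [PySem.Chars.join_singleton, joinDot_cons _ _ hy]
    | q :: rest' =>
      rw [List.cons_append, joinDot_cons _ _ (by simp), joinDot_cons _ _ (by simp), ih (by simp)]
      simp

theorem cand_prefix (cs : List Char) (i : Nat) (h1 : 1 ≤ i) (h2 : i < (splitDot [] cs).length) :
    PySem.Chars.join ['.'] ((splitDot [] cs).take i) ++ '.' :: PySem.Chars.join ['.'] ((splitDot [] cs).drop i) = cs := by
  have hcs : PySem.Chars.join ['.'] (splitDot [] cs) = cs := by
    simpa using joinDot_splitDot [] cs
  conv_rhs => rw [← hcs]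
  rw [← List.take_append_drop i (splitDot [] cs),
    joinDot_append _ _ (by intro hnil; have := congrArg List.length hnil; rw [List.length_take] at this; simp only [List.length_nil] at this; omega)
      (by intro hnil; have := congrArg List.length hnil; rw [List.length_drop] at this; simp only [List.length_nil] at this; omega)]
  simp [List.take_append_drop]

theorem cand_mono (parts : List (List Char)) (i j : Nat) (h1 : 1 ≤ i) (h2 : i < j) (h3 : j ≤ parts.length) :
    (PySem.Chars.join ['.'] (parts.take i)).length < (PySem.Chars.join ['.'] (parts.take j)).length := by
  have hsplit : parts.take j = parts.take i ++ (parts.take j).drop i := by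
    conv_lhs => rw [← List.take_append_drop i (parts.take j)]
    rw [List.take_take, min_eq_left (by omega)]
  rw [hsplit, joinDot_append _ _ (by intro hnil; have := congrArg List.length hnil; rw [List.length_take] at this; simp only [List.length_nil] at this; omega)
      (by intro hnil; have := congrArg List.length hnil; rw [List.length_drop, List.length_take] at this; simp only [List.length_nil] at this; omega)]
  simp

theorem cand_exists (cs k r : List Char) (h : cs = k ++ '.' :: r) :
    ∃ i, 1 ≤ i ∧ i < (splitDot [] cs).length ∧
      PySem.Chars.join ['.'] ((splitDot [] cs).take i) = k := by
  refine ⟨(splitDot [] k).length, ?_, ?_, ?_⟩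
  · have := splitDot_ne_nil [] k
    cases hsk : splitDot [] k with
    | nil => exact absurd hsk this
    | cons a l => simp
  · rw [h, splitDot_append]
    have := splitDot_ne_nil [] r
    cases hsr : splitDot [] r with
    | nil => exact absurd hsr this
    | cons a l => simp
  · rw [h, splitDot_append, List.take_left]
    simpa using joinDot_splitDot [] k

theorem match_inj (cs k k' : List Char) (h : k ++ ['.'] <+: cs) (h' : k' ++ ['.'] <+: cs)
    (hl : k.length = k'.length) : k = k' :=
  List.IsPrefix.eq_of_length
    (List.prefix_of_prefix_length_le
      ((List.prefix_append k ['.']).trans h) ((List.prefix_append k' ['.']).trans h') (by omega)) hl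

theorem loop_eq_findSome? (keys : List String) (parts : List (List Char)) (l : List Int) :
    resolveKeyLoop keys parts l =
      l.findSome? (fun i =>
        let key := String.ofList (PySem.Chars.join ['.'] (PySem.List.slice parts none (some i)))
        if keys.contains key then some key else none) := by
  induction l with
  | nil => rfl
  | cons i rest ih =>
    rw [resolveKeyLoop, List.findSome?_cons]
    by_cases h : keys.contains (String.ofList (PySem.Chars.join ['.'] (PySem.List.slice parts none (some i)))) = true
    · simp only [h, if_pos]
    · simp only [h, if_neg, Bool.false_eq_true, not_false_iff, ih]

theorem findSome?_if {α : Type} (f : Nat → α) (p : Nat → Bool) (l : List Nat) :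
    l.findSome? (fun i => if p i then some (f i) else none) = (l.find? p).map f := by
  induction l with
  | nil => rfl
  | cons i rest ih =>
    by_cases h : p i <;> simp [h, ih]

theorem best_mem (ik : String) (ks : List String) (best : Option String) (h : ik ∈ ks) :
    resolveKeyBest ik best ks = some ik := by
  induction ks generalizing best with
  | nil => simp at h
  | cons k rest ih =>
    simp only [resolveKeyBest]
    by_cases hk : k = ik
    · simp [hk]
    · rw [if_neg (by simp [hk])]
      have hmem : ik ∈ rest := by
        rcases List.mem_cons.mp h with h1 | h1
        · exact absurd h1.symm hk
        · exact h1
      split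
      all_goals split
      all_goals exact ih _ hmem

theorem best_none (ik : String) (ks : List String) (best : Option String)
    (h : ∀ k ∈ ks, k ≠ ik ∧ PySem.Chars.startswith ik.toList (k.toList ++ ['.']) = false) :
    resolveKeyBest ik best ks = best := by
  induction ks generalizing best with
  | nil => rfl
  | cons k rest ih =>
    obtain ⟨hne, hsw⟩ := h k (by simp)
    simp only [resolveKeyBest]
    rw [if_neg (by simp [hne]), hsw]
    simp only [Bool.false_and, Bool.false_eq_true, if_neg, not_false_iff]
    exact ih _ (fun k' hk' => h k' (by simp [hk']))

theorem best_min (ik t : String)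
    (ht : PySem.Chars.startswith ik.toList (t.toList ++ ['.']) = true)
    (hinj : ∀ k : String, PySem.Chars.startswith ik.toList (k.toList ++ ['.']) = true →
        k.toList.length = t.toList.length → k = t) :
    ∀ (ks : List String) (best : Option String),
      ik ∉ ks →
      (∀ k ∈ ks, PySem.Chars.startswith ik.toList (k.toList ++ ['.']) = true →
        t.toList.length ≤ k.toList.length) →
      (∀ b, best = some b → PySem.Chars.startswith ik.toList (b.toList ++ ['.']) = true ∧
        t.toList.length ≤ b.toList.length) →
      (t ∈ ks ∨ best = some t) →
      resolveKeyBest ik best ks = some t := by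
  intro ks
  induction ks with
  | nil =>
    intro best _ _ hbest hin
    rcases hin with h | h
    · simp at h
    · simp [resolveKeyBest, h]
  | cons k rest ih =>
    intro best hik hlen hbest hin
    have hkne : k ≠ ik := fun he => hik (by simp [he])
    simp only [resolveKeyBest]
    rw [if_neg (by simp [hkne])]
    have hikr : ik ∉ rest := fun hm => hik (by simp [hm])
    have hlenr : ∀ k' ∈ rest, PySem.Chars.startswith ik.toList (k'.toList ++ ['.']) = true →
        t.toList.length ≤ k'.toList.length := fun k' hm => hlen k' (by simp [hm])
    by_cases hsw : PySem.Chars.startswith ik.toList (k.toList ++ ['.']) = true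
    · have hklen : t.toList.length ≤ k.toList.length := hlen k (by simp) hsw
      -- the boolean condition
      cases best with
      | none =>
        simp only [hsw, Bool.true_and, if_pos]
        by_cases hkt : k = t
        · subst hkt
          exact ih (some k) hikr hlenr (fun b hb' => by cases hb'; exact ⟨hsw, le_refl _⟩) (Or.inr rfl)
        · have htr : t ∈ rest := by
            rcases hin with h | h
            · rcases List.mem_cons.mp h with h1 | h1
              · exact absurd h1.symm hkt
              · exact h1
            · simp at h
          exact ih (some k) hikr hlenr (fun b hb' => by cases hb'; exact ⟨hsw, hklen⟩) (Or.inl htr)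
      | some b =>
        obtain ⟨hbsw, hblen⟩ := hbest b rfl
        simp only [PySem.Chars.len]
        by_cases hlt : k.toList.length < b.toList.length
        · rw [if_pos (by simp only [hsw, Bool.true_and, decide_eq_true_eq]; exact_mod_cast hlt)]
          -- update to k
          by_cases hkt : k = t
          · subst hkt
            exact ih (some k) hikr hlenr (fun b' hb' => by cases hb'; exact ⟨hsw, le_refl _⟩) (Or.inr rfl)
          · have htr : t ∈ rest := by
              rcases hin with h | h
              · rcases List.mem_cons.mp h with h1 | h1
                · exact absurd h1.symm hkt
                · exact h1
              · cases h
                exact absurd (hinj k hsw (le_antisymm (by omega) hklen)) hkt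
            exact ih (some k) hikr hlenr (fun b' hb' => by cases hb'; exact ⟨hsw, hklen⟩) (Or.inl htr)
        · rw [if_neg (by simp only [hsw, Bool.true_and, decide_eq_true_eq]; intro h; exact hlt (by exact_mod_cast h))]
          -- keep best = some b
          by_cases hbt : b = t
          · exact ih (some b) hikr hlenr (fun b' hb' => by cases hb'; exact ⟨hbsw, hblen⟩)
              (Or.inr (by rw [hbt]))
          · have htr : t ∈ rest := by
              rcases hin with h | h
              · rcases List.mem_cons.mp h with h1 | h1
                · -- k = t, but then len t ≥ len b ≥ len t so b = t, contra
                  subst h1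
                  exact absurd (hinj b hbsw (le_antisymm (by omega) hblen)) hbt
                · exact h1
              · cases h; exact absurd rfl hbt
            exact ih (some b) hikr hlenr (fun b' hb' => by cases hb'; exact ⟨hbsw, hblen⟩) (Or.inl htr)
    · -- no match: keep best
      rw [if_neg (by simp [hsw])]
      have htr : t ∈ rest ∨ best = some t := by
        rcases hin with h | h
        · rcases List.mem_cons.mp h with h1 | h1
          · subst h1; exact absurd ht hsw
          · exact Or.inl h1
        · exact Or.inr h
      exact ih best hikr hlenr hbest htr

theorem main_eq (ik : String) (keys : List String) :
    resolve_key ik keys = resolve_key_alt ik keys := by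
  by_cases hik : keys.contains ik = true
  · rw [resolve_key, if_pos hik, resolve_key_alt,
      best_mem ik keys none (List.contains_iff_mem.mp hik)]
  · rw [resolve_key, if_neg hik]
    have hikmem : ik ∉ keys := fun h => hik (List.contains_iff_mem.mpr h)
    set cs := ik.toList with hcs
    rw [splitOn_eq]
    set parts := splitDot [] cs with hparts
    have hpne : parts ≠ [] := splitDot_ne_nil [] cs
    have hn1 : 1 ≤ parts.length := by
      cases hp : parts with
      | nil => exact absurd hp hpne
      | cons a l => simp
    -- rewrite the loop to find? over range
    rw [loop_eq_findSome?, PySem.List.pyRange_one]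
    rw [List.findSome?_map]
    have hcast : ((parts.length : Int) - 1).toNat = parts.length - 1 := by omega
    rw [hcast]
    have hcomp : ∀ j : Nat,
        ((fun i => let key := String.ofList (PySem.Chars.join ['.'] (PySem.List.slice parts none (some i)))
          if keys.contains key then some key else none) ∘ (fun k : Nat => (1 : Int) + k)) j
        = (fun j : Nat =>
            if keys.contains (String.ofList (PySem.Chars.join ['.'] (parts.take (j+1))))
            then some (String.ofList (PySem.Chars.join ['.'] (parts.take (j+1)))) else none) j := by
      intro j
      have : (1 : Int) + (j : Nat) = ((j + 1 : Nat) : Int) := by push_cast; ring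
      simp only [Function.comp_apply, this, PySem.List.slice_to_natCast]
    rw [funext hcomp]
    rw [findSome?_if (fun j => String.ofList (PySem.Chars.join ['.'] (parts.take (j+1))))
      (fun j => keys.contains (String.ofList (PySem.Chars.join ['.'] (parts.take (j+1)))))]
    set p : Nat → Bool := fun j => keys.contains (String.ofList (PySem.Chars.join ['.'] (parts.take (j+1)))) with hp
    -- helper: a matching key equals a candidate
    have hmatch : ∀ k : String, PySem.Chars.startswith cs (k.toList ++ ['.']) = true →
        ∃ i, 1 ≤ i ∧ i < parts.length ∧ PySem.Chars.join ['.'] (parts.take i) = k.toList := by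
      intro k hk
      obtain ⟨r, hr⟩ := (PySem.Chars.startswith_iff _ _).mp hk
      have : cs = k.toList ++ '.' :: r := by rw [← hr]; simp
      obtain ⟨i, h1, h2, h3⟩ := cand_exists cs k.toList r this
      exact ⟨i, h1, by simp only [← hparts] at h2; exact h2, by simp only [← hparts] at h3; exact h3⟩
    cases hfind : List.find? p (List.range (parts.length - 1)) with
    | none =>
      have hnone : ∀ k ∈ keys, k ≠ ik ∧ PySem.Chars.startswith cs (k.toList ++ ['.']) = false := by
        intro k hk
        constructor
        · exact fun he => hikmem (he ▸ hk)
        · by_contra hsw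
          have hsw' : PySem.Chars.startswith cs (k.toList ++ ['.']) = true := by
            cases h : PySem.Chars.startswith cs (k.toList ++ ['.']) with
            | false => exact absurd h hsw
            | true => rfl
          obtain ⟨i, h1, h2, h3⟩ := hmatch k hsw'
          have hmemr : i - 1 ∈ List.range (parts.length - 1) := by
            rw [List.mem_range]; omega
          have := List.find?_eq_none.mp hfind _ hmemr
          apply this
          show keys.contains (String.ofList (PySem.Chars.join ['.'] (parts.take (i - 1 + 1)))) = true
          have : i - 1 + 1 = i := by omega
          rw [this, h3, String.ofList_toList]
          exact List.contains_iff_mem.mpr hk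
      rw [resolve_key_alt, best_none ik keys none hnone]
      rfl
    | some j0 =>
      simp only [Option.map_some]
      obtain ⟨hpj0, idx, hidx, hgetj0, hmin⟩ := List.find?_eq_some_iff_getElem.mp hfind
      rw [List.getElem_range] at hgetj0
      subst hgetj0
      rw [List.length_range] at hidx
      have hminp : ∀ j : Nat, j < idx → p j = false := by
        intro j hj
        have h2 := hmin j hj
        rw [List.getElem_range] at h2
        simpa using h2
      have hpidx : p idx = true := hpj0
      -- the target candidate
      set t : String := String.ofList (PySem.Chars.join ['.'] (parts.take (idx + 1))) with htdef
      have htlist : t.toList = PySem.Chars.join ['.'] (parts.take (idx + 1)) := String.toList_ofList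
      have hprefix : ∀ i : Nat, 1 ≤ i → i < parts.length →
          PySem.Chars.startswith cs ((PySem.Chars.join ['.'] (parts.take i)) ++ ['.']) = true := by
        intro i h1 h2
        rw [PySem.Chars.startswith_iff]
        refine ⟨PySem.Chars.join ['.'] (parts.drop i), ?_⟩
        have := cand_prefix cs i h1 (by simp only [← hparts]; exact h2)
        rw [← hparts] at this
        rw [← this]; simp
      have ht : PySem.Chars.startswith cs (t.toList ++ ['.']) = true := by
        rw [htlist]; exact hprefix (idx + 1) (by omega) (by omega)
      have hinj : ∀ k : String, PySem.Chars.startswith cs (k.toList ++ ['.']) = true →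
          k.toList.length = t.toList.length → k = t := by
        intro k hk hlen
        have h1 := (PySem.Chars.startswith_iff _ _).mp hk
        have h2 := (PySem.Chars.startswith_iff _ _).mp ht
        have := match_inj cs k.toList t.toList h1 h2 hlen
        calc k = String.ofList k.toList := String.ofList_toList.symm
          _ = String.ofList t.toList := by rw [this]
          _ = t := String.ofList_toList
      have hlen : ∀ k ∈ keys, PySem.Chars.startswith cs (k.toList ++ ['.']) = true →
          t.toList.length ≤ k.toList.length := by
        intro k hk hsw
        obtain ⟨i, h1, h2, h3⟩ := hmatch k hsw
        have hpi : p (i - 1) = true := by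
          show keys.contains (String.ofList (PySem.Chars.join ['.'] (parts.take (i - 1 + 1)))) = true
          have hi : i - 1 + 1 = i := by omega
          rw [hi, h3, String.ofList_toList]
          exact List.contains_iff_mem.mpr hk
        have hge : idx ≤ i - 1 := by
          by_contra hlt
          rw [hminp (i - 1) (by omega)] at hpi
          exact absurd hpi (by simp)
        rw [htlist, ← h3]
        by_cases heq : idx + 1 = i
        · rw [heq]
        · exact le_of_lt (cand_mono parts (idx + 1) i (by omega) (by omega) (by omega))
      have hin : t ∈ keys := List.contains_iff_mem.mp hpidx
      rw [resolve_key_alt,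
        best_min ik t ht hinj keys none hikmem hlen (by intro b hb; cases hb) (Or.inl hin)]

-- ===== VERDICT (by name: the statement is the Claim_ definition above) =====
theorem resolve_key_spec : Claim_equal_resolve_key := by
  intro input_key all_form_variable_keys _
  unfold Spec_resolve_key
  exact main_eq input_key all_form_variable_keys
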